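-- pv_equiv track=rewrite | github.com/robertmoga/PythonDraw | PyDraw/dev/intelli_recognition.py | get_bounds_variable
-- ===== SOURCE A (Python) =====
-- def get_bounds_variable(white_values):
--
--     bounds = list()
--     index = -1
--
--     def trigger(pos, vec):
--         count = 0
--         for i in range(pos, len(vec) - 1):
--             if abs(vec[i] - vec[i + 1]) > 4:
--                 return count
--             count += 1
--
--         return -1
--
--     for i in range(len(white_values) - 1):
--         if index > -1 and i < index:
--             continue
--
--         if (white_values[i] < 8 and white_values[i] > 0) and \
--                 (white_values[i + 1] < 8 and white_values[i + 1] > 0):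
--             if abs(white_values[i] - white_values[i + 1]) < 5:
--
--                 count = trigger(i, white_values)
--                 if count != -1:
--                     bounds.append(int(count / 2 + i))
--                     index = i + count
--
--     return bounds
-- ===== SOURCE B (Python) =====
-- def get_bounds_variable(white_values):
--     v = white_values
--     n = len(v)
--     # dist[i]: offset from i to the first adjacent jump (difference > 4) at or
--     # after position i, or None if no jump occurs before the end of the list.
--     dist = []
--     nxt = None
--     for i in range(n - 2, -1, -1):
--         if abs(v[i] - v[i + 1]) > 4:
--             nxt = 0
--         elif nxt is not None:
--             nxt += 1
--         dist.append(nxt)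
--     dist.reverse()
--     bounds = []
--     i = 0
--     while i < n - 1:
--         d = dist[i]
--         if 0 < v[i] < 8 and 0 < v[i + 1] < 8 and abs(v[i] - v[i + 1]) < 5 and d is not None:
--             bounds.append(d // 2 + i)
--             i += d + 1  # the pair at i+d differs by >4, so it can never start a run
--         else:
--             i += 1
--     return bounds
-- ===== Notes on version B (the rewrite author's own statement) =====
-- stated objective: alternative
-- what changed: A rescans forward from every candidate run start with the inner trigger() helper; B precomputes the distance from each position to the next adjacent jump (difference > 4) in one backward pass and then emits the run midpoints in a single forward sweep with O(1) lookups.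
import Mathlib
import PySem

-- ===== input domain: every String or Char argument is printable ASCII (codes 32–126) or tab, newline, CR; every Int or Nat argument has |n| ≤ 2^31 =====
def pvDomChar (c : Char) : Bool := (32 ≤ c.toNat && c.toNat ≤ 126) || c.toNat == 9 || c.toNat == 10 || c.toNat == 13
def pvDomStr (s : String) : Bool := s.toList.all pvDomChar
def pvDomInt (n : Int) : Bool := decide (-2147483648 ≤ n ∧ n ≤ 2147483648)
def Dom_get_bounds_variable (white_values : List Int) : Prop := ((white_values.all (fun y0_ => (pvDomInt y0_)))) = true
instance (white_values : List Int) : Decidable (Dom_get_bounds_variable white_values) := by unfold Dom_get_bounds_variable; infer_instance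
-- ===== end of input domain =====

-- B restructures A: instead of A's per-start rescans (`trigger` walks to the next big jump
-- from every candidate position), B precomputes the distance to the next adjacent jump in one
-- backward pass and emits the run midpoints in a single forward sweep with lookups.

-- ===== PORT A =====
-- inner function trigger: counts steps from pos until the first adjacent difference > 4, -1 if none
def pvTrigGo (vec : List Int) : Int → List Int → Int
  | _, [] => -1
  | count, i :: rest =>
    if |PySem.List.pyGetD vec i 0 - PySem.List.pyGetD vec (i + 1) 0| > 4 then count
    else pvTrigGo vec (count + 1) rest

def pvTrigger (pos : Int) (vec : List Int) : Int :=
  pvTrigGo vec 0 (PySem.List.pyRange pos (PySem.List.len vec - 1) 1)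

-- one iteration of A's outer for-loop; state = (bounds, index)
def pvStepA (v : List Int) (st : List Int × Int) (i : Int) : List Int × Int :=
  if st.2 > -1 ∧ i < st.2 then st
  else if (PySem.List.pyGetD v i 0 < 8 ∧ PySem.List.pyGetD v i 0 > 0) ∧
          (PySem.List.pyGetD v (i + 1) 0 < 8 ∧ PySem.List.pyGetD v (i + 1) 0 > 0) then
    if |PySem.List.pyGetD v i 0 - PySem.List.pyGetD v (i + 1) 0| < 5 then
      let count := pvTrigger i v
      -- int(count/2 + i) = count // 2 + i here: count ≥ 0 and i ≥ 0
      if count ≠ -1 then (st.1 ++ [PySem.Int.floordiv count 2 + i], i + count)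
      else st
    else st
  else st

def get_bounds_variable (white_values : List Int) : List Int :=
  ((PySem.List.pyRange 0 (PySem.List.len white_values - 1) 1).foldl
    (pvStepA white_values) ([], -1)).1

-- ===== PORT B =====
-- one iteration of B's backward pass; state = (nxt, dist-so-far in descending index order)
def pvStepD (v : List Int) (st : Option Int × List (Option Int)) (i : Int) :
    Option Int × List (Option Int) :=
  let nxt : Option Int :=
    if |PySem.List.pyGetD v i 0 - PySem.List.pyGetD v (i + 1) 0| > 4 then some 0
    else match st.1 with
      | some k => some (k + 1)
      | none => none
  (nxt, st.2 ++ [nxt])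

def pvBuildDist (v : List Int) : List (Option Int) :=
  (((PySem.List.pyRange (PySem.List.len v - 2) (-1) (-1)).foldl (pvStepD v) (none, [])).2).reverse

-- B's forward while-loop with the jump i += d + 1
def pvLoopB (v : List Int) (dist : List (Option Int)) (n : Nat) (bounds : List Int) (i : Nat) :
    List Int :=
  if _h : i < n - 1 then
    match dist.getD i none with
    | some d =>
      if 0 < PySem.List.pyGetD v (i : Int) 0 ∧ PySem.List.pyGetD v (i : Int) 0 < 8 ∧
         0 < PySem.List.pyGetD v ((i : Int) + 1) 0 ∧ PySem.List.pyGetD v ((i : Int) + 1) 0 < 8 ∧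
         |PySem.List.pyGetD v (i : Int) 0 - PySem.List.pyGetD v ((i : Int) + 1) 0| < 5 then
        pvLoopB v dist n (bounds ++ [PySem.Int.floordiv d 2 + (i : Int)]) (i + d.toNat + 1)
      else pvLoopB v dist n bounds (i + 1)
    | none => pvLoopB v dist n bounds (i + 1)
  else bounds
termination_by n - 1 - i
decreasing_by all_goals omega

def get_bounds_variable_alt (white_values : List Int) : List Int :=
  pvLoopB white_values (pvBuildDist white_values) white_values.length [] 0

-- ===== PRECONDITION & SPEC =====
def Spec_get_bounds_variable (white_values : List Int) (out : List Int) : Prop := out = get_bounds_variable_alt white_values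
instance (white_values : List Int) (out : List Int) : Decidable (Spec_get_bounds_variable white_values out) := by unfold Spec_get_bounds_variable; infer_instance

-- ===== CLAIM (what is proved, stated in full; the proofs are below) =====
def Claim_equal_get_bounds_variable : Prop := ∀ (white_values : List Int), Dom_get_bounds_variable white_values → Spec_get_bounds_variable white_values (get_bounds_variable white_values)

-- ===== LEMMAS AND PROOFS =====

-- mathematical distance-to-next-jump function, the bridge between A's `trigger` and B's dist list
def dFn (v : List Int) (i : Nat) : Option Int :=
  if _h : i < v.length - 1 then
    if |v.getD i 0 - v.getD (i + 1) 0| > 4 then some 0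
    else match dFn v (i + 1) with
      | some k => some (k + 1)
      | none => none
  else none
termination_by v.length - i
decreasing_by omega

lemma dFn_none_of_ge (v : List Int) (i : Nat) (h : ¬ i < v.length - 1) : dFn v i = none := by
  rw [dFn]; simp [h]

lemma dFn_spec (v : List Int) (i : Nat) (k : Int) (h : dFn v i = some k) :
    0 ≤ k ∧ i + k.toNat < v.length - 1 ∧
      |v.getD (i + k.toNat) 0 - v.getD (i + k.toNat + 1) 0| > 4 := by
  rw [dFn] at h
  by_cases hi : i < v.length - 1
  · rw [dif_pos hi] at h
    by_cases hb : |v.getD i 0 - v.getD (i + 1) 0| > 4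
    · rw [if_pos hb] at h
      obtain rfl : (0 : Int) = k := by injection h
      simpa using ⟨hi, hb⟩
    · rw [if_neg hb] at h
      cases hd : dFn v (i + 1) with
      | none => rw [hd] at h; exact absurd h (by simp)
      | some k' =>
        rw [hd] at h
        obtain rfl : k' + 1 = k := by injection h
        obtain ⟨h0, h1, h2⟩ := dFn_spec v (i + 1) k' hd
        have he : i + (k' + 1).toNat = (i + 1) + k'.toNat := by omega
        refine ⟨by omega, by omega, ?_⟩
        rw [he]; exact h2
  · rw [dif_neg hi] at h; exact absurd h (by simp)
termination_by v.length - i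
decreasing_by omega

lemma dFn_pos (v : List Int) (i : Nat) (k : Int)
    (hn : ¬ |v.getD i 0 - v.getD (i + 1) 0| > 4) (h : dFn v i = some k) : 1 ≤ k := by
  rw [dFn] at h
  by_cases hi : i < v.length - 1
  · rw [dif_pos hi, if_neg hn] at h
    cases hd : dFn v (i + 1) with
    | none => rw [hd] at h; exact absurd h (by simp)
    | some k' =>
      rw [hd] at h
      obtain rfl : k' + 1 = k := by injection h
      have := (dFn_spec v (i + 1) k' hd).1
      omega
  · rw [dif_neg hi] at h; exact absurd h (by simp)

lemma trig_eq (v : List Int) : ∀ (m i : Nat) (c : Int), v.length - 1 - i ≤ m →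
    pvTrigGo v c (PySem.List.pyRange (i : Int) ((v.length : Int) - 1) 1) =
      (match dFn v i with | none => -1 | some k => c + k) := by
  intro m
  induction m with
  | zero =>
    intro i c hm
    rw [PySem.List.pyRange_one_eq_nil (by omega), dFn_none_of_ge v i (by omega)]
    rfl
  | succ m ih =>
    intro i c hm
    by_cases hi : i < v.length - 1
    · rw [PySem.List.pyRange_one_cons (by omega)]
      show (if |PySem.List.pyGetD v (i:Int) 0 - PySem.List.pyGetD v ((i:Int) + 1) 0| > 4 then c
        else pvTrigGo v (c + 1) (PySem.List.pyRange ((i:Int)+1) ((v.length : Int) - 1) 1)) = _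
      have hc : ((i : Int) + 1) = ((i + 1 : Nat) : Int) := by push_cast; ring
      rw [hc, PySem.List.pyGetD_natCast, PySem.List.pyGetD_natCast]
      by_cases hb : |v.getD i 0 - v.getD (i + 1) 0| > 4
      · rw [if_pos hb]
        conv_rhs => rw [dFn, dif_pos hi, if_pos hb]
        show c = c + 0
        ring
      · rw [if_neg hb, ih (i + 1) (c + 1) (by omega)]
        conv_rhs => rw [dFn, dif_pos hi, if_neg hb]
        cases dFn v (i + 1) with
        | none => rfl
        | some k => show c + 1 + k = c + (k + 1); ring
    · rw [PySem.List.pyRange_one_eq_nil (by omega), dFn_none_of_ge v i (by omega)]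
      rfl

lemma stepD_eq (v : List Int) (i : Nat) (hi : i < v.length - 1) (acc : List (Option Int)) :
    pvStepD v (dFn v (i + 1), acc) (i : Int) = (dFn v i, acc ++ [dFn v i]) := by
  have hx : dFn v i = if |v.getD i 0 - v.getD (i + 1) 0| > 4 then some 0
      else match dFn v (i + 1) with | some k => some (k + 1) | none => none := by
    rw [dFn, dif_pos hi]
  unfold pvStepD
  have hc : ((i : Int) + 1) = ((i + 1 : Nat) : Int) := by push_cast; ring
  rw [hc, PySem.List.pyGetD_natCast, PySem.List.pyGetD_natCast]
  dsimp only
  rw [← hx]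

lemma buildAux (v : List Int) : ∀ (i : Nat), i < v.length - 1 → ∀ (acc : List (Option Int)),
    (PySem.List.pyRange (i : Int) (-1) (-1)).foldl (pvStepD v) (dFn v (i + 1), acc) =
      (dFn v 0, acc ++ ((List.range (i + 1)).reverse.map (dFn v))) := by
  intro i
  induction i with
  | zero =>
    intro hi acc
    rw [show ((0 : Nat) : Int) = 0 by norm_num,
      PySem.List.pyRange_neg_one_cons (by norm_num : (-1 : Int) < 0)]
    rw [show (0 : Int) - 1 = -1 by ring, PySem.List.pyRange_neg_one_eq_nil le_rfl]
    simp only [List.foldl_cons, List.foldl_nil]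
    rw [show ((0 : Int)) = ((0 : Nat) : Int) by norm_num, stepD_eq v 0 hi acc]
    simp
  | succ n ihn =>
    intro hi acc
    rw [PySem.List.pyRange_neg_one_cons (by push_cast; omega)]
    rw [show ((n + 1 : Nat) : Int) - 1 = ((n : Nat) : Int) by push_cast; ring]
    simp only [List.foldl_cons]
    rw [stepD_eq v (n + 1) hi acc]
    rw [ihn (by omega) (acc ++ [dFn v (n + 1)])]
    simp [List.range_succ]

lemma build_eq (v : List Int) :
    pvBuildDist v = (List.range (v.length - 1)).map (dFn v) := by
  unfold pvBuildDist
  by_cases hn : v.length < 2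
  · rw [PySem.List.pyRange_neg_one_eq_nil (by simp [PySem.List.len]; omega)]
    interval_cases h : v.length <;> simp_all
  · have h2 : PySem.List.len v - 2 = ((v.length - 2 : Nat) : Int) := by
      simp [PySem.List.len_eq]; omega
    rw [h2]
    have h0 : (none : Option Int) = dFn v ((v.length - 2) + 1) := by
      rw [dFn_none_of_ge v _ (by omega)]
    rw [show ((none : Option Int), ([] : List (Option Int))) = (dFn v ((v.length - 2) + 1), ([] : List (Option Int))) by rw [← h0]]
    rw [buildAux v (v.length - 2) (by omega) []]
    simp only [List.nil_append, List.map_reverse, List.reverse_reverse]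
    have h3 : v.length - 2 + 1 = v.length - 1 := by omega
    rw [h3]

lemma stepA_skip (v : List Int) (st : List Int × Int) (i : Int)
    (h : st.2 > -1 ∧ i < st.2) : pvStepA v st i = st := by
  unfold pvStepA
  rw [if_pos h]

lemma stepA_brk (v : List Int) (j : Nat) (bs : List Int)
    (hb : |v.getD j 0 - v.getD (j + 1) 0| > 4) :
    pvStepA v (bs, (j : Int)) (j : Int) = (bs, (j : Int)) := by
  unfold pvStepA
  dsimp only
  rw [if_neg (by omega)]
  have hc : ((j : Int) + 1) = ((j + 1 : Nat) : Int) := by push_cast; ring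
  rw [hc, PySem.List.pyGetD_natCast, PySem.List.pyGetD_natCast]
  by_cases h1 : (v.getD j 0 < 8 ∧ v.getD j 0 > 0) ∧ (v.getD (j + 1) 0 < 8 ∧ v.getD (j + 1) 0 > 0)
  · rw [if_pos h1, if_neg ?_]
    intro h5
    rcases abs_cases (v.getD j 0 - v.getD (j + 1) 0) with ⟨he, _⟩ | ⟨he, _⟩ <;>
      rw [he] at hb h5 <;> omega
  · rw [if_neg h1]

lemma skipA (v : List Int) : ∀ (m i j : Nat) (bs : List Int), j - i ≤ m → i ≤ j →
    j < v.length - 1 → |v.getD j 0 - v.getD (j + 1) 0| > 4 →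
    (PySem.List.pyRange (i : Int) ((v.length : Int) - 1) 1).foldl (pvStepA v) (bs, (j : Int)) =
    (PySem.List.pyRange ((j : Int) + 1) ((v.length : Int) - 1) 1).foldl (pvStepA v) (bs, (j : Int)) := by
  intro m
  induction m with
  | zero =>
    intro i j bs hm hij hj hb
    obtain rfl : i = j := by omega
    rw [PySem.List.pyRange_one_cons (by omega)]
    rw [List.foldl_cons, stepA_brk v i bs hb]
  | succ m ih =>
    intro i j bs hm hij hj hb
    by_cases he : i = j
    · subst he
      rw [PySem.List.pyRange_one_cons (by omega)]
      rw [List.foldl_cons, stepA_brk v i bs hb]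
    · rw [PySem.List.pyRange_one_cons (by omega)]
      rw [List.foldl_cons, stepA_skip v _ _ (by constructor <;> omega)]
      rw [show ((i : Int) + 1) = ((i + 1 : Nat) : Int) by push_cast; ring]
      exact ih (i + 1) j bs (by omega) (by omega) hj hb

lemma stepA_eval (v : List Int) (bs : List Int) (idx : Int) (i : Nat) (h : idx ≤ (i : Int)) :
    pvStepA v (bs, idx) (i : Int) =
      if (v.getD i 0 < 8 ∧ v.getD i 0 > 0) ∧ (v.getD (i + 1) 0 < 8 ∧ v.getD (i + 1) 0 > 0) then
        if |v.getD i 0 - v.getD (i + 1) 0| < 5 then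
          if pvTrigger (i : Int) v ≠ -1 then
            (bs ++ [PySem.Int.floordiv (pvTrigger (i : Int) v) 2 + (i : Int)],
              (i : Int) + pvTrigger (i : Int) v)
          else (bs, idx)
        else (bs, idx)
      else (bs, idx) := by
  unfold pvStepA
  dsimp only
  rw [if_neg (by omega)]
  rw [show ((i : Int) + 1) = ((i + 1 : Nat) : Int) by push_cast; ring,
    PySem.List.pyGetD_natCast, PySem.List.pyGetD_natCast]

lemma mainA (v : List Int) : ∀ (m i : Nat) (bs : List Int) (idx : Int),
    v.length - 1 - i ≤ m → idx ≤ (i : Int) →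
    ((PySem.List.pyRange (i : Int) ((v.length : Int) - 1) 1).foldl (pvStepA v) (bs, idx)).1 =
      pvLoopB v (pvBuildDist v) v.length bs i := by
  intro m
  induction m with
  | zero =>
    intro i bs idx hm hidx
    rw [PySem.List.pyRange_one_eq_nil (by omega), List.foldl_nil, pvLoopB, dif_neg (by omega)]
  | succ m ih =>
    intro i bs idx hm hidx
    by_cases hi : i < v.length - 1
    · rw [PySem.List.pyRange_one_cons (by omega), List.foldl_cons, stepA_eval v bs idx i hidx]
      have htr : pvTrigger (i : Int) v =
          (match dFn v i with | none => -1 | some k => (0 : Int) + k) := by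
        unfold pvTrigger
        rw [PySem.List.len_eq]
        exact trig_eq v (v.length) i 0 (by omega)
      have hca : ((i : Int) + 1) = ((i + 1 : Nat) : Int) := by push_cast; ring
      rw [pvLoopB, dif_pos hi, build_eq, PySem.List.getD_map_range (dFn v) _ _ _ hi]
      rw [hca, PySem.List.pyGetD_natCast, PySem.List.pyGetD_natCast]
      by_cases hcond : (v.getD i 0 < 8 ∧ v.getD i 0 > 0) ∧
          (v.getD (i + 1) 0 < 8 ∧ v.getD (i + 1) 0 > 0)
      · rw [if_pos hcond]
        by_cases h5 : |v.getD i 0 - v.getD (i + 1) 0| < 5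
        · rw [if_pos h5]
          cases hd : dFn v i with
          | none =>
            have htr2 : pvTrigger (i : Int) v = -1 := by rw [htr, hd]
            rw [htr2]
            dsimp only
            rw [if_neg (by simp), ih (i + 1) bs idx (by omega) (by omega), build_eq]
          | some k =>
            have hnb : ¬ |v.getD i 0 - v.getD (i + 1) 0| > 4 := by
              rcases abs_cases (v.getD i 0 - v.getD (i + 1) 0) with ⟨he, _⟩ | ⟨he, _⟩ <;>
                rw [he] at h5 ⊢ <;> omega
            have hk1 : 1 ≤ k := dFn_pos v i k hnb hd
            obtain ⟨hk0, hjlt, hjb⟩ := dFn_spec v i k hd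
            have htr2 : pvTrigger (i : Int) v = k := by rw [htr, hd]; exact zero_add k
            rw [htr2]
            dsimp only
            rw [if_pos (by omega : (k : Int) ≠ -1), if_pos (by tauto)]
            have hjc : (i : Int) + k = ((i + k.toNat : Nat) : Int) := by push_cast; omega
            rw [hjc]
            rw [skipA v (i + k.toNat - (i + 1)) (i + 1) (i + k.toNat) _ (by omega) (by omega)
              hjlt hjb]
            rw [show (((i + k.toNat : Nat) : Int) + 1) = ((i + k.toNat + 1 : Nat) : Int) by
              push_cast; ring]
            rw [ih (i + k.toNat + 1) _ _ (by omega) (by push_cast; omega), build_eq]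
        · rw [if_neg h5]
          have hb : (¬ (0 < v.getD i 0 ∧ v.getD i 0 < 8 ∧ 0 < v.getD (i + 1) 0 ∧
              v.getD (i + 1) 0 < 8 ∧ |v.getD i 0 - v.getD (i + 1) 0| < 5)) := by tauto
          cases hd : dFn v i with
          | none =>
            dsimp only
            rw [ih (i + 1) bs idx (by omega) (by omega), build_eq]
          | some k =>
            dsimp only
            rw [if_neg hb, ih (i + 1) bs idx (by omega) (by omega), build_eq]
      · rw [if_neg hcond]
        have hb : (¬ (0 < v.getD i 0 ∧ v.getD i 0 < 8 ∧ 0 < v.getD (i + 1) 0 ∧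
            v.getD (i + 1) 0 < 8 ∧ |v.getD i 0 - v.getD (i + 1) 0| < 5)) := by tauto
        cases hd : dFn v i with
        | none =>
          dsimp only
          rw [ih (i + 1) bs idx (by omega) (by omega), build_eq]
        | some k =>
          dsimp only
          rw [if_neg hb, ih (i + 1) bs idx (by omega) (by omega), build_eq]
    · rw [PySem.List.pyRange_one_eq_nil (by omega), List.foldl_nil, pvLoopB, dif_neg (by omega)]

-- ===== VERDICT (by name: the statement is the Claim_ definition above) =====
theorem get_bounds_variable_spec : Claim_equal_get_bounds_variable := by
  intro v _
  unfold Spec_get_bounds_variable get_bounds_variable get_bounds_variable_alt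
  have h := mainA v (v.length) 0 [] (-1) (by omega) (by norm_num)
  simpa [PySem.List.len_eq] using h
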